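-- pv_equiv track=rewrite | github.com/pberkes/Bento | bento/commands/script_utils.py | nt_quote_arg
-- ===== SOURCE A (Python) =====
-- def nt_quote_arg(arg):
--     """Quote a command line argument according to Windows parsing
--     rules"""
--
--     result = []
--     needquote = False
--     nb = 0
--
--     needquote = (" " in arg) or ("\t" in arg)
--     if needquote:
--         result.append('"')
--
--     for c in arg:
--         if c == '\\':
--             nb += 1
--         elif c == '"':
--             # double preceding backslashes, then add a \"
--             result.append('\\' * (nb*2) + '\\"')
--             nb = 0
--         else:
--             if nb:
--                 result.append('\\' * nb)
--                 nb = 0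
--             result.append(c)
--
--     if nb:
--         result.append('\\' * nb)
--
--     if needquote:
--         result.append('\\' * nb)    # double the trailing backslashes
--         result.append('"')
--
--     return ''.join(result)
-- ===== SOURCE B (Python) =====
-- def _dbl_tail(s):
--     # append one extra backslash for each trailing backslash of s
--     n = 0
--     while n < len(s) and s[-1 - n] == '\\':
--         n += 1
--     return s + '\\' * n
--
--
-- def nt_quote_arg(arg):
--     """Quote a command line argument according to Windows parsing
--     rules"""
--     needquote = (" " in arg) or ("\t" in arg)
--     parts = arg.split('"')
--     # each quote is escaped and the run of backslashes before it doubled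
--     body = ''.join(_dbl_tail(p) + '\\"' for p in parts[:-1]) + parts[-1]
--     if needquote:
--         return '"' + _dbl_tail(body) + '"'
--     return body
-- ===== Notes on version B (the rewrite author's own statement) =====
-- stated objective: faster
-- what changed: Replaced the stateful per-character scan with a backslash counter by split-on-quote: each segment before a quote gets its trailing backslash run doubled and is joined with an escaped quote, and under needquote the whole body's trailing run is doubled once more.
import Mathlib
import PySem

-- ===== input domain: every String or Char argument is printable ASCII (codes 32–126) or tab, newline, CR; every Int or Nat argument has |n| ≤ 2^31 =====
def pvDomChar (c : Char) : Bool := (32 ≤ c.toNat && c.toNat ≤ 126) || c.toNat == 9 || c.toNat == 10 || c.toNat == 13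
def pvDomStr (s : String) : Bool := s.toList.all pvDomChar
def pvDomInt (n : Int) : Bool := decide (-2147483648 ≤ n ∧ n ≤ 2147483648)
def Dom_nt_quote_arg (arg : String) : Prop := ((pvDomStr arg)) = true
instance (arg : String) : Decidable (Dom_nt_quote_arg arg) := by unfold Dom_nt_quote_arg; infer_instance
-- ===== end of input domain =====

-- B replaces A's stateful per-character scan by split-on-quote / escape-each-segment / join (measurably faster in CPython; same asymptotic cost).

-- ===== PORT A =====
-- the for-loop of A: state = (result, nb)
def ntqLoop : List Char → List String → Nat → List String × Nat
  | [], res, nb => (res, nb)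
  | c :: cs, res, nb =>
    if c = '\\' then ntqLoop cs res (nb + 1)
    else if c = '"' then
      ntqLoop cs (res ++ [String.ofList (List.replicate (nb * 2) '\\' ++ ['\\', '"'])]) 0
    else
      ntqLoop cs (res ++ (if nb ≠ 0 then [String.ofList (List.replicate nb '\\')] else [])
                      ++ [String.ofList [c]]) 0

def nt_quote_arg (arg : String) : String :=
  let needquote := PySem.Str.isIn " " arg || PySem.Str.isIn "\t" arg
  let res0 : List String := if needquote then ["\""] else []
  let p := ntqLoop arg.toList res0 0
  let res1 := p.1
  let nb := p.2
  let res2 := if nb ≠ 0 then res1 ++ [String.ofList (List.replicate nb '\\')] else res1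
  let res3 := if needquote then res2 ++ [String.ofList (List.replicate nb '\\'), "\""] else res2
  PySem.Str.join "" res3

-- ===== PORT B =====
-- _dbl_tail: count the trailing backslash run and append that many backslashes
def pvTrailBS (s : List Char) : Nat := (s.reverse.takeWhile (· == '\\')).length

def pvDblTail (s : List Char) : List Char := s ++ List.replicate (pvTrailBS s) '\\'

def nt_quote_arg_alt (arg : String) : String :=
  let needquote := PySem.Str.isIn " " arg || PySem.Str.isIn "\t" arg
  let parts := PySem.Chars.splitOn arg.toList ['"']
  let body := (parts.dropLast.map (fun p => pvDblTail p ++ ['\\', '"'])).flatten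
              ++ parts.getLastD []
  if needquote then String.ofList ('"' :: (pvDblTail body ++ ['"'])) else String.ofList body

-- ===== PRECONDITION & SPEC =====
def Spec_nt_quote_arg (arg : String) (out : String) : Prop := out = nt_quote_arg_alt arg
instance (arg : String) (out : String) : Decidable (Spec_nt_quote_arg arg out) := by unfold Spec_nt_quote_arg; infer_instance

-- ===== CLAIM (what is proved, stated in full; the proofs are below) =====
def Claim_equal_nt_quote_arg : Prop := ∀ (arg : String), Dom_nt_quote_arg arg → Spec_nt_quote_arg arg (nt_quote_arg arg)

-- ===== LEMMAS AND PROOFS =====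

-- canonical emitted body of the scan, pending run nb
def gq : List Char → Nat → List Char
  | [], nb => List.replicate nb '\\'
  | c :: cs, nb =>
    if c = '\\' then gq cs (nb + 1)
    else if c = '"' then List.replicate (nb * 2) '\\' ++ ['\\', '"'] ++ gq cs 0
    else List.replicate nb '\\' ++ c :: gq cs 0

-- final value of nb after the scan
def tq : List Char → Nat → Nat
  | [], nb => nb
  | c :: cs, nb => if c = '\\' then tq cs (nb + 1) else tq cs 0

-- reference split on '"'
def qsp : List Char → List (List Char)
  | [] => [[]]
  | c :: cs =>
    if c = '"' then [] :: qsp cs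
    else match qsp cs with
      | [] => [[c]]
      | p :: t => (c :: p) :: t

def flatS (rs : List String) : List Char := (rs.map String.toList).flatten

def bodyOf (parts : List (List Char)) : List Char :=
  (parts.dropLast.map (fun p => pvDblTail p ++ ['\\', '"'])).flatten ++ parts.getLastD []

def consFst (x : List Char) : List (List Char) → List (List Char)
  | [] => [x]
  | p :: t => (x ++ p) :: t

theorem qsp_ne_nil (cs : List Char) : qsp cs ≠ [] := by
  cases cs with
  | nil => simp [qsp]
  | cons c cs =>
    simp only [qsp]
    split
    · simp
    · split <;> simp

theorem take_while_append_ne (p : Char → Bool) {c : Char} (h : p c = false)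
    (as bs : List Char) : (as ++ c :: bs).takeWhile p = as.takeWhile p := by
  induction as with
  | nil => simp [h]
  | cons a as ih => by_cases hpa : p a <;> simp [hpa, ih]

theorem trailBS_append_ne {c : Char} (h : c ≠ '\\') (xs ys : List Char) :
    pvTrailBS (xs ++ c :: ys) = pvTrailBS ys := by
  unfold pvTrailBS
  have hc : (c == '\\') = false := by simpa using h
  rw [show (xs ++ c :: ys).reverse = ys.reverse ++ c :: xs.reverse by simp,
      take_while_append_ne (fun x => x == '\\') hc]

theorem trailBS_replicate (n : Nat) : pvTrailBS (List.replicate n '\\') = n := by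
  unfold pvTrailBS
  simp

theorem trailBS_gq (cs : List Char) (nb : Nat) : pvTrailBS (gq cs nb) = tq cs nb := by
  induction cs generalizing nb with
  | nil => simp [gq, tq, trailBS_replicate]
  | cons c cs ih =>
    by_cases hbs : c = '\\'
    · simp [gq, tq, hbs, ih]
    · by_cases hq : c = '"'
      · rw [show gq (c :: cs) nb = List.replicate (nb * 2) '\\' ++ ['\\', '"'] ++ gq cs 0 by
              simp [gq, hq],
           show tq (c :: cs) nb = tq cs 0 by simp [tq, hbs]]
        rw [show List.replicate (nb * 2) '\\' ++ ['\\', '"'] ++ gq cs 0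
              = (List.replicate (nb * 2) '\\' ++ ['\\']) ++ '"' :: gq cs 0 by simp,
            trailBS_append_ne (by decide) _ _, ih]
      · rw [show gq (c :: cs) nb = List.replicate nb '\\' ++ c :: gq cs 0 by
              simp [gq, hbs, hq],
           show tq (c :: cs) nb = tq cs 0 by simp [tq, hbs]]
        rw [trailBS_append_ne hbs _ _, ih]

theorem ntqLoop_snd (cs : List Char) (res : List String) (nb : Nat) :
    (ntqLoop cs res nb).2 = tq cs nb := by
  induction cs generalizing res nb with
  | nil => simp [ntqLoop, tq]
  | cons c cs ih =>
    by_cases hbs : c = '\\'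
    · simp [ntqLoop, tq, hbs, ih]
    · by_cases hq : c = '"' <;> simp [ntqLoop, tq, hbs, hq, ih]

theorem flatS_append (rs ss : List String) : flatS (rs ++ ss) = flatS rs ++ flatS ss := by
  simp [flatS]

theorem ntqLoop_fst (cs : List Char) (res : List String) (nb : Nat) :
    flatS (ntqLoop cs res nb).1 ++ List.replicate (tq cs nb) '\\' = flatS res ++ gq cs nb := by
  induction cs generalizing res nb with
  | nil => simp [ntqLoop, tq, gq, flatS]
  | cons c cs ih =>
    simp only [ntqLoop, gq, tq]
    by_cases hbs : c = '\\'
    · simp only [if_pos hbs]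
      exact ih res (nb + 1)
    · simp only [if_neg hbs]
      by_cases hq : c = '"'
      · simp only [if_pos hq]
        rw [ih, flatS_append]
        simp [flatS]
      · simp only [if_neg hq]
        rw [ih, flatS_append, flatS_append]
        by_cases hnb : nb = 0 <;> simp [flatS, hnb]

theorem bodyOf_cons (x : List Char) (l : List (List Char)) (h : l ≠ []) :
    bodyOf (x :: l) = pvDblTail x ++ ['\\', '"'] ++ bodyOf l := by
  unfold bodyOf
  cases l with
  | nil => simp at h
  | cons a t => simp [List.dropLast_cons_of_ne_nil]

theorem bodyOf_single (x : List Char) : bodyOf [x] = x := by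
  simp [bodyOf]

theorem dblTail_prefix_ne {c : Char} (h : c ≠ '\\') (r p : List Char) :
    pvDblTail (r ++ c :: p) = r ++ c :: pvDblTail p := by
  unfold pvDblTail
  rw [trailBS_append_ne h r p]
  simp

theorem bodyOf_consFst (cs : List Char) (nb : Nat) :
    bodyOf (consFst (List.replicate nb '\\') (qsp cs)) = gq cs nb := by
  induction cs generalizing nb with
  | nil => simp [qsp, consFst, bodyOf, gq]
  | cons c cs ih =>
    obtain ⟨p, t, hpt⟩ : ∃ p t, qsp cs = p :: t := by
      cases h : qsp cs with
      | nil => exact absurd h (qsp_ne_nil cs)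
      | cons p t => exact ⟨p, t, rfl⟩
    have h2 : bodyOf (p :: t) = gq cs 0 := by
      have h := ih 0
      rw [hpt] at h
      simpa only [consFst, List.nil_append] using h
    by_cases hbs : c = '\\'
    · have heq : consFst (List.replicate nb '\\') (qsp (c :: cs))
           = consFst (List.replicate (nb + 1) '\\') (qsp cs) := by
        simp [qsp, hbs, hpt, consFst, List.replicate_succ']
      rw [heq, ih]
      simp [gq, hbs]
    · by_cases hq : c = '"'
      · have h1 : consFst (List.replicate nb '\\') (qsp (c :: cs))
             = List.replicate nb '\\' :: qsp cs := by simp [qsp, hq, consFst]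
        rw [h1, bodyOf_cons _ _ (qsp_ne_nil cs), hpt, h2]
        simp [gq, hq, pvDblTail, trailBS_replicate, Nat.mul_two]
      · have h1 : consFst (List.replicate nb '\\') (qsp (c :: cs))
             = (List.replicate nb '\\' ++ c :: p) :: t := by simp [qsp, hq, hpt, consFst]
        rw [h1]
        cases t with
        | nil =>
          rw [bodyOf_single]
          rw [bodyOf_single] at h2
          simp [gq, hbs, hq, h2]
        | cons u us =>
          have hne : (u :: us : List (List Char)) ≠ [] := by simp
          rw [bodyOf_cons _ _ hne, dblTail_prefix_ne hbs] at *
          have h3 : gq (c :: cs) nb = List.replicate nb '\\' ++ c :: gq cs 0 := by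
            simp [gq, hbs, hq]
          rw [h3, ← h2]
          simp

theorem splitOn_go_eq (fuel : Nat) : ∀ (l cur : List Char) (acc : List (List Char)),
    l.length < fuel →
    PySem.Chars.splitOn.go ['"'] fuel l cur acc
      = acc.reverse ++ consFst cur.reverse (qsp l) := by
  induction fuel with
  | zero => intro l cur acc h; omega
  | succ n ih =>
    intro l cur acc h
    cases l with
    | nil =>
      rw [PySem.Chars.splitOn.go.eq_def]
      simp [qsp, consFst]
    | cons c rest =>
      rw [PySem.Chars.splitOn.go.eq_def]
      simp only [List.length_cons] at h
      by_cases hq : c = '"'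
      · have hpre : List.isPrefixOf ['"'] (c :: rest) = true := by
          simp [List.isPrefixOf, hq]
        simp only [hpre, if_true, List.length_cons, List.length_nil, List.drop_succ_cons,
          List.drop_zero]
        rw [ih rest [] (cur.reverse :: acc) (by omega)]
        simp [qsp, hq, consFst]
        cases hs : qsp rest with
        | nil => exact absurd hs (qsp_ne_nil rest)
        | cons p t => simp
      · have hpre : List.isPrefixOf ['"'] (c :: rest) = false := by
          simp [List.isPrefixOf]
          exact fun hcq => absurd hcq.symm hq
        simp only [hpre, Bool.false_eq_true, if_false]
        rw [ih rest (c :: cur) acc (by omega)]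
        cases hs : qsp rest with
        | nil => exact absurd hs (qsp_ne_nil rest)
        | cons p t => simp [qsp, hq, hs, consFst]

theorem splitOn_eq_qsp (cs : List Char) : PySem.Chars.splitOn cs ['"'] = qsp cs := by
  unfold PySem.Chars.splitOn
  rw [splitOn_go_eq (cs.length + 1) cs [] [] (by omega)]
  cases hs : qsp cs with
  | nil => exact absurd hs (qsp_ne_nil cs)
  | cons p t => simp [consFst]

theorem join_empty_sep (ps : List (List Char)) : PySem.Chars.join [] ps = ps.flatten := by
  induction ps with
  | nil => rfl
  | cons p ps ih =>
    cases ps with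
    | nil => simp [PySem.Chars.join, List.intercalate]
    | cons q qs => rw [PySem.Chars.join_cons_cons]; simp_all

-- ===== VERDICT (by name: the statement is the Claim_ definition above) =====
theorem nt_quote_arg_spec : Claim_equal_nt_quote_arg := by
  intro arg _
  unfold Spec_nt_quote_arg nt_quote_arg nt_quote_arg_alt
  simp only [splitOn_eq_qsp]
  have hbody : ((qsp arg.toList).dropLast.map (fun p => pvDblTail p ++ ['\\', '"'])).flatten
      ++ (qsp arg.toList).getLastD [] = gq arg.toList 0 := by
    have h := bodyOf_consFst arg.toList 0
    cases hs : qsp arg.toList with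
    | nil => exact absurd hs (qsp_ne_nil arg.toList)
    | cons p t =>
      rw [hs] at h
      simpa only [consFst, List.nil_append, bodyOf, hs] using h
  set need := (PySem.Str.isIn " " arg || PySem.Str.isIn "\t" arg) with hneedDef
  set res0 : List String := if need then ["\""] else [] with hres0
  set L := ntqLoop arg.toList res0 0 with hL
  have hfst := ntqLoop_fst arg.toList res0 0
  have hsnd := ntqLoop_snd arg.toList res0 0
  rw [← hL] at hfst hsnd
  have hflat2 : flatS (if L.2 ≠ 0 then L.1 ++ [String.ofList (List.replicate L.2 '\\')] else L.1)
      = flatS L.1 ++ List.replicate L.2 '\\' := by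
    by_cases h0 : L.2 = 0 <;> simp [h0, flatS]
  have hcore : flatS L.1 ++ List.replicate L.2 '\\' = flatS res0 ++ gq arg.toList 0 := by
    rw [hsnd]; exact hfst
  apply String.toList_inj.mp
  rw [PySem.Str.toList_join, show ("" : String).toList = [] from rfl, join_empty_sep,
      hbody]
  by_cases hneed : need = true
  · have hres : res0 = ["\""] := by rw [hres0, if_pos hneed]
    have hr0 : flatS res0 = ['"'] := by rw [hres]; decide
    simp only [hneed, if_true]
    show flatS ((if L.2 ≠ 0 then L.1 ++ [String.ofList (List.replicate L.2 '\\')] else L.1)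
          ++ [String.ofList (List.replicate L.2 '\\'), "\""])
        = (String.ofList ('"' :: (pvDblTail (gq arg.toList 0) ++ ['"']))).toList
    rw [flatS_append, hflat2, hcore, hr0]
    have hdt : pvDblTail (gq arg.toList 0) = gq arg.toList 0 ++ List.replicate (tq arg.toList 0) '\\' := by
      unfold pvDblTail
      rw [trailBS_gq]
    rw [hdt, hsnd]
    simp [flatS]
  · have hneed' : need = false := by simpa using hneed
    have hr0 : flatS res0 = [] := by rw [hres0, if_neg hneed]; rfl
    simp only [hneed', Bool.false_eq_true, if_false]
    show flatS (if L.2 ≠ 0 then L.1 ++ [String.ofList (List.replicate L.2 '\\')] else L.1)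
        = (String.ofList (gq arg.toList 0)).toList
    rw [hflat2, hcore, hr0]
    simp
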